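-- pv_equiv track=rewrite | github.com/gjy04207-maker/nbamockdraft | app/main.py | _choose_auto_player
-- ===== SOURCE A (Python) =====
-- def _position_matches_need(position: str, needs: list[str]) -> bool:
--     pos_upper = position.upper()
--     for need in needs:
--         if need in pos_upper:
--             return True
--     return False
--
-- def _choose_auto_player(players: list[dict], available_ids: set[str], needs: list[str], use_needs: bool) -> dict | None:
--     if use_needs and needs:
--         for player in players:
--             if player.get("id") not in available_ids:
--                 continue
--             if _position_matches_need(player.get("position", ""), needs):
--                 return player
--     for player in players:
--         if player.get("id") in available_ids:
--             return player
--     return None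
-- ===== SOURCE B (Python) =====
-- def _choose_auto_player(players: list, available_ids: set, needs: list, use_needs: bool):
--     # One pass: return a need-matching available player on sight; otherwise
--     # remember the first available player as fallback.
--     check_needs = bool(use_needs and needs)
--     first_available = None
--     for player in players:
--         pid = player.get("id")
--         if pid is None or pid not in available_ids:
--             continue
--         if check_needs and any(need in player.get("position", "").upper() for need in needs):
--             return player
--         if first_available is None:
--             first_available = player
--     return first_available
-- ===== Notes on version B (the rewrite author's own statement) =====
-- stated objective: alternative
-- what changed: Replaced A's two sequential scans (need-matching pass, then plain-availability pass) by a single scan that returns a need-matcher on sight while maintaining the first available player as a fallback accumulator; the helper's loop becomes an any() generator.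
import Mathlib
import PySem

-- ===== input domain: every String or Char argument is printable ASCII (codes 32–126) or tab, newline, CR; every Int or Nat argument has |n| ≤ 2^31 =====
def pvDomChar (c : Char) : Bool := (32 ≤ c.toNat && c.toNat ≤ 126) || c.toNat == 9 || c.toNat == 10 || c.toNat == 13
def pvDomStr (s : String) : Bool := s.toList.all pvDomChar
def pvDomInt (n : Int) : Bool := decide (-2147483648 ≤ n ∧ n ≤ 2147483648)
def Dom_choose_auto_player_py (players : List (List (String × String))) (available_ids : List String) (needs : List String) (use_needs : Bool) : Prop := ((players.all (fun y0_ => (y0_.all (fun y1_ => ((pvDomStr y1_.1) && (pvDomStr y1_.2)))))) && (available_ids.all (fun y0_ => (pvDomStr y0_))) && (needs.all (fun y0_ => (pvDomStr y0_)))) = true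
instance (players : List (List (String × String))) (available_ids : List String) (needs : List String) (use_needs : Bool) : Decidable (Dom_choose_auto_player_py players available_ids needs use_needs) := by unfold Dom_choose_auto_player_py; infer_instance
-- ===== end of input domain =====

-- B merges A's two sequential scans over players into one pass that keeps the first available player as a fallback (alternative decomposition, same cost).


-- ===== PORT A =====
-- helper: _position_matches_need — loop over needs, substring test against position.upper()
def pvPosMatchGoA (pos_upper : String) : List String → Bool
  | [] => false
  | need :: rest => if PySem.Str.isIn need pos_upper then true else pvPosMatchGoA pos_upper rest

def pvPositionMatchesNeed (position : String) (needs : List String) : Bool :=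
  pvPosMatchGoA (PySem.Str.upper position) needs

-- player.get("id") in available_ids (None is never in the set)
def pvIdAvailA (available_ids : List String) (player : List (String × String)) : Bool :=
  match PySem.Dict.get? (PySem.Dict.mk player) "id" with
  | some pid => available_ids.contains pid
  | none => false

-- A's first (need-gated) loop
def pvFindNeedA (available_ids needs : List String) : List (List (String × String)) → Option (List (String × String))
  | [] => none
  | player :: rest =>
    if !(pvIdAvailA available_ids player) then pvFindNeedA available_ids needs rest
    else if pvPositionMatchesNeed ((PySem.Dict.get? (PySem.Dict.mk player) "position").getD "") needs then
      some player
    else pvFindNeedA available_ids needs rest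

-- A's second loop
def pvFindAvailA (available_ids : List String) : List (List (String × String)) → Option (List (String × String))
  | [] => none
  | player :: rest =>
    if pvIdAvailA available_ids player then some player
    else pvFindAvailA available_ids rest

def choose_auto_player_py (players : List (List (String × String))) (available_ids : List String) (needs : List String) (use_needs : Bool) : Option (List (String × String)) :=
  if use_needs && !needs.isEmpty then
    match pvFindNeedA available_ids needs players with
    | some player => some player
    | none => pvFindAvailA available_ids players
  else pvFindAvailA available_ids players

-- ===== PORT B =====
-- any(need in position.upper() for need in needs)
def pvNeedAnyB (needs : List String) (position : String) : Bool :=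
  needs.any (fun need => PySem.Str.isIn need (PySem.Str.upper position))

-- B's single scan with fallback accumulator first_available
def pvScanB (available_ids needs : List String) (check_needs : Bool) : List (List (String × String)) → Option (List (String × String)) → Option (List (String × String))
  | [], first_available => first_available
  | player :: rest, first_available =>
    match PySem.Dict.get? (PySem.Dict.mk player) "id" with
    | none => pvScanB available_ids needs check_needs rest first_available
    | some pid =>
      if !(available_ids.contains pid) then pvScanB available_ids needs check_needs rest first_available
      else if check_needs && pvNeedAnyB needs ((PySem.Dict.get? (PySem.Dict.mk player) "position").getD "") then some player
      else match first_available with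
        | none => pvScanB available_ids needs check_needs rest (some player)
        | some fa => pvScanB available_ids needs check_needs rest (some fa)

def choose_auto_player_py_alt (players : List (List (String × String))) (available_ids : List String) (needs : List String) (use_needs : Bool) : Option (List (String × String)) :=
  pvScanB available_ids needs (use_needs && !needs.isEmpty) players none
-- ===== PRECONDITION & SPEC =====
def Spec_choose_auto_player_py (players : List (List (String × String))) (available_ids : List String) (needs : List String) (use_needs : Bool) (out : Option (List (String × String))) : Prop := out = choose_auto_player_py_alt players available_ids needs use_needs
instance (players : List (List (String × String))) (available_ids : List String) (needs : List String) (use_needs : Bool) (out : Option (List (String × String))) : Decidable (Spec_choose_auto_player_py players available_ids needs use_needs out) := by unfold Spec_choose_auto_player_py; infer_instance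

-- ===== CLAIM (what is proved, stated in full; the proofs are below) =====
def Claim_equal_choose_auto_player_py : Prop := ∀ (players : List (List (String × String))) (available_ids : List String) (needs : List String) (use_needs : Bool), Dom_choose_auto_player_py players available_ids needs use_needs → Spec_choose_auto_player_py players available_ids needs use_needs (choose_auto_player_py players available_ids needs use_needs)

-- ===== LEMMAS AND PROOFS =====

lemma needAny_eq (needs : List String) (pos : String) :
    pvNeedAnyB needs pos = pvPosMatchGoA (PySem.Str.upper pos) needs := by
  induction needs with
  | nil => rfl
  | cons n rest ih =>
    simp [pvNeedAnyB, pvPosMatchGoA] at *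
    by_cases h : PySem.Str.isIn n (PySem.Str.upper pos) = true <;> simp [ih]

lemma scanB_eq (ids needs : List String) (g : Bool) (ps : List (List (String × String))) (fb : Option (List (String × String))) :
    pvScanB ids needs g ps fb =
      match (if g then pvFindNeedA ids needs ps else none) with
      | some p => some p
      | none => match fb with
        | some f => some f
        | none => pvFindAvailA ids ps := by
  induction ps generalizing fb with
  | nil => cases g <;> cases fb <;> simp [pvScanB, pvFindNeedA, pvFindAvailA]
  | cons p rest ih =>
    cases hid : PySem.Dict.get? (PySem.Dict.mk p) "id" with
    | none =>
      have hav : pvIdAvailA ids p = false := by simp only [pvIdAvailA, hid]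
      cases g <;> simp [pvScanB, hid, ih, pvFindNeedA, pvFindAvailA, hav]
    | some pid =>
      have hpm : pvPositionMatchesNeed ((PySem.Dict.get? (PySem.Dict.mk p) "position").getD "") needs
          = pvNeedAnyB needs ((PySem.Dict.get? (PySem.Dict.mk p) "position").getD "") := by
        rw [needAny_eq]; rfl
      cases hc : ids.contains pid with
      | false =>
        have hav : pvIdAvailA ids p = false := by simp only [pvIdAvailA, hid]; exact hc
        have hmem : pid ∉ ids := by simpa using hc
        cases g <;> simp [pvScanB, hid, hmem, ih, pvFindNeedA, pvFindAvailA, hav]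
      | true =>
        have hav : pvIdAvailA ids p = true := by simp only [pvIdAvailA, hid]; exact hc
        have hmem : pid ∈ ids := by simpa using hc
        cases g with
        | false =>
          cases fb <;> simp [pvScanB, hid, hmem, ih, pvFindAvailA, hav]
        | true =>
          cases hm : pvNeedAnyB needs ((PySem.Dict.get? (PySem.Dict.mk p) "position").getD "") with
          | true => simp [pvScanB, hid, hmem, hm, pvFindNeedA, hav, hpm]
          | false =>
            cases fb <;> simp [pvScanB, hid, hmem, hm, ih, pvFindNeedA, pvFindAvailA, hav, hpm]

-- ===== VERDICT (by name: the statement is the Claim_ definition above) =====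
theorem choose_auto_player_py_spec : Claim_equal_choose_auto_player_py := by
  intro players ids needs use_needs _
  unfold Spec_choose_auto_player_py choose_auto_player_py choose_auto_player_py_alt
  rw [scanB_eq]
  cases h : (use_needs && !needs.isEmpty) <;> simp
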